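-- pv_equiv track=rewrite | github.com/veya2ztn/AI4Earthquake-FisH | evaluator/visualization.py | factor_filter
-- ===== SOURCE A (Python) =====
-- def binary_search_next_smallest(S, value):
--     left, right = 0, len(S) - 1
--     result = -1
--     while left <= right:
--         mid = left + (right - left) // 2
--         if S[mid] > value:
--             result = mid
--             right = mid - 1
--         else:
--             left = mid + 1
--     return result
--
-- def factor_filter(P, S):
--     P = sorted(P)
--     S = sorted(S)
--     R = set()
--
--     for p in P:
--         index = binary_search_next_smallest(S, p)
--         if index != -1:
--             R.add(S[index])
--
--     return R
-- ===== SOURCE B (Python) =====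
-- def factor_filter(P, S):
--     # One ascending merge pass over sorted P and sorted S instead of a
--     # binary search per element of P.
--     P = sorted(P)
--     S = sorted(S)
--     R = set()
--     j = 0
--     n = len(S)
--     for p in P:
--         while j < n and S[j] <= p:
--             j += 1
--         if j < n:
--             R.add(S[j])
--     return R
-- ===== Notes on version B (the rewrite author's own statement) =====
-- stated objective: faster
-- what changed: Replaces the per-element binary search over sorted S with a single forward merge pass: one index j into sorted S only ever advances while iterating sorted P in ascending order.
import Mathlib
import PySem

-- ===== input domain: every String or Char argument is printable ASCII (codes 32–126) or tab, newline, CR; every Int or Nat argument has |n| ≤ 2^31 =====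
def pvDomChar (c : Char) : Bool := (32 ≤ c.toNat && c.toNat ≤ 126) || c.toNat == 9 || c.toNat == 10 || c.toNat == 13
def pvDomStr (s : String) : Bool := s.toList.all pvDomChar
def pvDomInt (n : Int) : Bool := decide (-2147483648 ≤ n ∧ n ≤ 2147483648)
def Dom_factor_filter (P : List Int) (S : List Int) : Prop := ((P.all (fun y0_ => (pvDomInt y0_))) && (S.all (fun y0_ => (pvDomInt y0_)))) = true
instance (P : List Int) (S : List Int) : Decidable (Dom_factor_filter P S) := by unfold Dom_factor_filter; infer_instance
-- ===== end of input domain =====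

-- B replaces A's per-element binary search over sorted S with a single forward merge pass (constant-factor speedup; equal results proved below).


-- ===== PORT A =====
-- the while-loop of binary_search_next_smallest; state (left, right, result).
-- S[mid] is ported as pyGetD S mid 0: the loop keeps 0 ≤ left ≤ mid ≤ right < len S,
-- so the index is always in range and pyGetD is exact here.
def bsLoop (S : List Int) (value left right result : Int) : Int :=
  if left ≤ right then
    let mid := left + PySem.Int.floordiv (right - left) 2
    if PySem.List.pyGetD S mid 0 > value then
      bsLoop S value left (mid - 1) mid
    else
      bsLoop S value (mid + 1) right result
  else
    result
termination_by (right + 1 - left).toNat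
decreasing_by
  · have hfd := PySem.Int.floordiv_eq_ediv_of_pos (a := right - left) (by omega : (0:Int) < 2)
    have h0 : 0 ≤ (right - left) / 2 := Int.ediv_nonneg (by omega) (by omega)
    have h1 : (right - left) / 2 ≤ right - left := Int.ediv_le_self _ (by omega)
    omega
  · have hfd := PySem.Int.floordiv_eq_ediv_of_pos (a := right - left) (by omega : (0:Int) < 2)
    have h0 : 0 ≤ (right - left) / 2 := Int.ediv_nonneg (by omega) (by omega)
    omega

def binary_search_next_smallest (S : List Int) (value : Int) : Int :=
  bsLoop S value 0 ((S.length : Int) - 1) (-1)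

def factor_filter (P : List Int) (S : List Int) : List Int :=
  let Ps := PySem.List.sorted P (fun x => x)
  let Ss := PySem.List.sorted S (fun x => x)
  Ps.foldl (fun R p =>
    let index := binary_search_next_smallest Ss p
    if index ≠ -1 then
      -- R.add(S[index]); index is in range whenever index ≠ -1, so pyGetD is exact
      PySem.Set.add R (PySem.List.pyGetD Ss index 0)
    else R) PySem.Set.empty

-- ===== PORT B =====
-- the inner while-loop of Source B: advance j while j < len S and S[j] <= p
def ffAdvance (S : List Int) (p : Int) (j : Nat) : Nat :=
  if h : j < S.length then
    if S[j] ≤ p then ffAdvance S p (j + 1) else j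
  else j
termination_by S.length - j

def factor_filter_alt (P : List Int) (S : List Int) : List Int :=
  let Ps := PySem.List.sorted P (fun x => x)
  let Ss := PySem.List.sorted S (fun x => x)
  (Ps.foldl (fun (st : Nat × List Int) p =>
      let j := ffAdvance Ss p st.1
      if h : j < Ss.length then (j, PySem.Set.add st.2 Ss[j]) else (j, st.2))
    (0, PySem.Set.empty)).2

-- ===== PRECONDITION & SPEC =====
def Spec_factor_filter (P : List Int) (S : List Int) (out : List Int) : Prop := out = factor_filter_alt P S
instance (P : List Int) (S : List Int) (out : List Int) : Decidable (Spec_factor_filter P S out) := by unfold Spec_factor_filter; infer_instance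

-- ===== CLAIM (what is proved, stated in full; the proofs are below) =====
def Claim_equal_factor_filter : Prop := ∀ (P : List Int) (S : List Int), Dom_factor_filter P S → Spec_factor_filter P S (factor_filter P S)

-- ===== LEMMAS AND PROOFS =====

-- tGt S p = length of the maximal prefix of S whose elements are ≤ p
def tGt (S : List Int) (p : Int) : Nat := (S.takeWhile (fun x => decide (x ≤ p))).length

lemma tGt_le (S : List Int) (p : Int) : tGt S p ≤ S.length :=
  (List.takeWhile_sublist _).length_le

-- on a sorted list, indices below tGt are exactly those with S[i] ≤ p
lemma tGt_char (S : List Int) (hS : S.Pairwise (· ≤ ·)) (p : Int) :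
    ∀ i (h : i < S.length), S[i] ≤ p ↔ i < tGt S p := by
  induction S with
  | nil => intro i h; simp at h
  | cons x xs ih =>
    have hx : ∀ y ∈ xs, x ≤ y := (List.pairwise_cons.mp hS).1
    have hxs : xs.Pairwise (· ≤ ·) := (List.pairwise_cons.mp hS).2
    intro i h
    by_cases hxp : x ≤ p
    · have ht : tGt (x :: xs) p = tGt xs p + 1 := by
        unfold tGt; simp [hxp]
      cases i with
      | zero => simp [ht, hxp]
      | succ n =>
        simp only [List.getElem_cons_succ, ht]
        have := ih hxs n (by simpa using Nat.lt_of_succ_lt_succ (by simpa using h))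
        rw [this]; omega
    · have ht : tGt (x :: xs) p = 0 := by
        unfold tGt; simp [hxp]
      cases i with
      | zero => simp [ht, hxp]
      | succ n =>
        simp only [List.getElem_cons_succ, ht]
        have hn : n < xs.length := by simpa using Nat.lt_of_succ_lt_succ (by simpa using h)
        have hxn : x ≤ xs[n] := hx _ (List.getElem_mem hn)
        constructor
        · intro hle; omega
        · intro hlt; omega

lemma tGt_mono (S : List Int) (hS : S.Pairwise (· ≤ ·)) {p q : Int} (hpq : p ≤ q) :
    tGt S p ≤ tGt S q := by
  by_contra hc
  rw [not_le] at hc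
  have hq : tGt S q < S.length := lt_of_lt_of_le hc (tGt_le S p)
  have h1 : S[tGt S q] ≤ p := ((tGt_char S hS p _ hq).mpr hc)
  have h2 : ¬ S[tGt S q] ≤ q := by
    intro h; exact absurd ((tGt_char S hS q _ hq).mp h) (lt_irrefl _)
  exact h2 (le_trans h1 hpq)

lemma bsLoop_eq (S : List Int) (value : Int) (t : Nat)
    (htle : t ≤ S.length)
    (hchar : ∀ i (h : i < S.length), S[i] ≤ value ↔ i < t) :
    ∀ (m : Nat) (left right result : Int),
    (right + 1 - left).toNat = m →
    0 ≤ left → left ≤ (t : Int) →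
    right = (if result = -1 then (S.length : Int) else result) - 1 →
    (t : Int) ≤ (if result = -1 then (S.length : Int) else result) →
    (result = -1 ∨ result < (S.length : Int)) →
    bsLoop S value left right result = if t < S.length then (t : Int) else -1 := by
  intro m
  induction m using Nat.strong_induction_on with
  | _ m ih =>
    intro left right result hm h0 hlt hrb htrb hres
    rw [bsLoop]
    by_cases hlr : left ≤ right
    · simp only [hlr, if_true]
      have hrble : (if result = -1 then (S.length : Int) else result) ≤ (S.length : Int) := by
        rcases hres with h | h
        · rw [if_pos h]
        · by_cases he : result = -1
          · rw [if_pos he]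
          · rw [if_neg he]; omega
      have hfd := PySem.Int.floordiv_eq_ediv_of_pos (a := right - left) (by omega : (0:Int) < 2)
      have hd0 : 0 ≤ (right - left) / 2 := Int.ediv_nonneg (by omega) (by omega)
      have hd1 : (right - left) / 2 ≤ right - left := Int.ediv_le_self _ (by omega)
      set mid := left + PySem.Int.floordiv (right - left) 2 with hmid
      have hmid0 : 0 ≤ mid := by omega
      have hmidlt : mid < (S.length : Int) := by omega
      have hget : PySem.List.pyGetD S mid 0 = S[mid.toNat]'(by omega) :=
        PySem.List.pyGetD_eq_getElem S 0 hmid0 hmidlt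
      have hmidnat : mid.toNat < S.length := by omega
      by_cases hcmp : PySem.List.pyGetD S mid 0 > value
      · simp only [hcmp, if_true]
        have htm : (t : Int) ≤ mid := by
          by_contra hc
          rw [not_le] at hc
          have hlt' : mid.toNat < t := by omega
          have := (hchar mid.toNat hmidnat).mpr hlt'
          omega
        have hresne : ¬ mid = -1 := by omega
        apply ih (mid - 1 + 1 - left).toNat (by omega) left (mid - 1) mid rfl h0 hlt
        · rw [if_neg hresne]
        · rw [if_neg hresne]; omega
        · right; omega
      · simp only [hcmp, if_false]
        have hml : S[mid.toNat]'hmidnat ≤ value := by rw [← hget]; omega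
        have hmt : mid.toNat < t := (hchar mid.toNat hmidnat).mp hml
        exact ih (right + 1 - (mid + 1)).toNat (by omega) (mid + 1) right result rfl
          (by omega) (by omega) hrb htrb hres
    · simp only [hlr, if_false]
      by_cases hne : result = -1
      · rw [if_pos hne] at hrb htrb
        have heq : (t : Int) = (S.length : Int) := by omega
        have ht : t = S.length := by exact_mod_cast heq
        simp [ht, hne]
      · rw [if_neg hne] at hrb htrb
        have hreslt : result < (S.length : Int) := hres.resolve_left hne
        have heq : (t : Int) = result := by omega
        have htl : t < S.length := by omega
        rw [if_pos htl, heq]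

lemma bsns_eq (S : List Int) (hS : S.Pairwise (· ≤ ·)) (p : Int) :
    binary_search_next_smallest S p =
      if tGt S p < S.length then ((tGt S p : Nat) : Int) else -1 := by
  unfold binary_search_next_smallest
  refine bsLoop_eq S p (tGt S p) (tGt_le S p) (tGt_char S hS p)
    _ 0 ((S.length : Int) - 1) (-1) rfl (by omega)
    (by exact_mod_cast Nat.zero_le _) (by rw [if_pos rfl]) ?_ (Or.inl rfl)
  rw [if_pos rfl]
  exact_mod_cast tGt_le S p

lemma ffAdvance_eq (S : List Int) (p : Int) (t : Nat)
    (htle : t ≤ S.length)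
    (hchar : ∀ i (h : i < S.length), S[i] ≤ p ↔ i < t) :
    ∀ j, j ≤ t → ffAdvance S p j = t := by
  intro j hj
  induction hd : t - j generalizing j with
  | zero =>
    have hjt : j = t := by omega
    subst hjt
    rw [ffAdvance]
    by_cases hjl : j < S.length
    · have hnot : ¬ S[j] ≤ p := by
        intro h; exact absurd ((hchar j hjl).mp h) (lt_irrefl _)
      rw [dif_pos hjl, if_neg hnot]
    · rw [dif_neg hjl]
  | succ n ihn =>
    have hjt : j < t := by omega
    have hjl : j < S.length := by omega
    have hle : S[j] ≤ p := (hchar j hjl).mpr hjt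
    rw [ffAdvance, dif_pos hjl, if_pos hle]
    exact ihn (j + 1) (by omega) (by omega)

lemma fold_eq (Ss : List Int) (hS : Ss.Pairwise (· ≤ ·)) :
    ∀ (ps : List Int), ps.Pairwise (· ≤ ·) →
    ∀ (j : Nat) (R : List Int), (∀ p ∈ ps, j ≤ tGt Ss p) →
    (ps.foldl (fun (st : Nat × List Int) p =>
        let j := ffAdvance Ss p st.1
        if h : j < Ss.length then (j, PySem.Set.add st.2 Ss[j]) else (j, st.2))
      (j, R)).2 =
    ps.foldl (fun R p =>
        let index := binary_search_next_smallest Ss p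
        if index ≠ -1 then PySem.Set.add R (PySem.List.pyGetD Ss index 0) else R) R := by
  intro ps
  induction ps with
  | nil => intro _ j R _; rfl
  | cons p rest ih =>
    intro hps j R hj
    have hrest : rest.Pairwise (· ≤ ·) := (List.pairwise_cons.mp hps).2
    have hpr : ∀ q ∈ rest, p ≤ q := (List.pairwise_cons.mp hps).1
    have hadv : ffAdvance Ss p j = tGt Ss p :=
      ffAdvance_eq Ss p (tGt Ss p) (tGt_le Ss p) (tGt_char Ss hS p) j (hj p (by simp))
    have hbs := bsns_eq Ss hS p
    have hjr : ∀ q ∈ rest, tGt Ss p ≤ tGt Ss q := fun q hq => tGt_mono Ss hS (hpr q hq)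
    simp only [List.foldl_cons]
    by_cases hlt : tGt Ss p < Ss.length
    · have hne : ((tGt Ss p : Int) ≠ -1) := by
        have h0 : (0:Int) ≤ (tGt Ss p : Int) := by exact_mod_cast Nat.zero_le _
        omega
      have hget : PySem.List.pyGetD Ss ((tGt Ss p : Nat) : Int) 0 = Ss[tGt Ss p]'hlt := by
        rw [PySem.List.pyGetD_eq_getElem Ss 0 (by exact_mod_cast Nat.zero_le _) (by exact_mod_cast hlt)]
        simp
      rw [hadv, dif_pos hlt, hbs, if_pos hlt, if_pos hne, hget]
      exact ih hrest (tGt Ss p) (PySem.Set.add R (Ss[tGt Ss p]'hlt)) hjr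
    · rw [hadv, dif_neg hlt, hbs, if_neg hlt, if_neg (by simp : ¬ ((-1 : Int) ≠ -1))]
      exact ih hrest (tGt Ss p) R hjr

lemma main_eq (P S : List Int) : factor_filter P S = factor_filter_alt P S := by
  unfold factor_filter factor_filter_alt
  have hS : (PySem.List.sorted S (fun x => x)).Pairwise (· ≤ ·) := by
    simpa using PySem.List.sorted_pairwise S (fun x => x)
  have hP : (PySem.List.sorted P (fun x => x)).Pairwise (· ≤ ·) := by
    simpa using PySem.List.sorted_pairwise P (fun x => x)
  exact (fold_eq _ hS _ hP 0 PySem.Set.empty (fun _ _ => Nat.zero_le _)).symm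

-- ===== VERDICT (by name: the statement is the Claim_ definition above) =====
theorem factor_filter_spec : Claim_equal_factor_filter := by
  intro P S _
  unfold Spec_factor_filter
  exact main_eq P S
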